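-- pv_equiv track=rewrite | github.com/Sneezyan123/discr_project_team_BOSS | maze_path.py | extract_maze
-- ===== SOURCE A (Python) =====
-- def extract_maze(maze: list[list[str]]) -> tuple[list[list[str]], list[tuple[int, int]]]:
--     """
--     Convert maze to zeros and ones, and get the end points
--     :param maze: list[list[str]], maze from file
--     :return: tuple[list[list[str]], list[tuple[int, int]]],
--     >>> pprint(extract_maze([['0', 'X', '1', '1', '0'], ['0', '0', '1', '1', '0'],\
--      ['0', 'X', '0', '1', '1'], ['0', '1', '0', '1', '0'], ['0', '1', '1', '1', '1'],\
--      ['0', '1', '0', '0', '0']]))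
--     ([['0', '1', '1', '1', '0'],
--       ['0', '0', '1', '1', '0'],
--       ['0', '1', '0', '1', '1'],
--       ['0', '1', '0', '1', '0'],
--       ['0', '1', '1', '1', '1'],
--       ['0', '1', '0', '0', '0']],
--      [(0, 1), (2, 1)])
--     >>> pprint(extract_maze(read_file('maze.csv')))
--
--     """
--     points = []
--     new_maze = []
--     for i, x in enumerate(maze):
--         row = []
--         for j, y in enumerate(x):
--             if y == 'X':
--                 points.append((i, j))
--                 row.append('1')
--             elif y == '1':
--                 row.append('1')
--             else:
--                 row.append('0')
--         new_maze.append(row)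
--     return new_maze, points
-- ===== SOURCE B (Python) =====
-- def extract_maze(maze: list[list[str]]) -> tuple[list[list[str]], list[tuple[int, int]]]:
--     """Recursive (structural) re-implementation: recursion over rows and cells,
--     building both results front-to-back by consing onto the recursive result,
--     instead of an iterative loop threading accumulators."""
--     def do_cells(i, j, cells):
--         if not cells:
--             return [], []
--         row, pts = do_cells(i, j + 1, cells[1:])
--         y = cells[0]
--         if y == 'X':
--             return ['1'] + row, [(i, j)] + pts
--         return [('1' if y == '1' else '0')] + row, pts
--
--     def do_rows(i, rows):
--         if not rows:
--             return [], []
--         rest_maze, rest_pts = do_rows(i + 1, rows[1:])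
--         row, pts = do_cells(i, 0, rows[0])
--         return [row] + rest_maze, pts + rest_pts
--
--     new_maze, points = do_rows(0, maze)
--     return new_maze, points
-- ===== Notes on version B (the rewrite author's own statement) =====
-- stated objective: alternative
-- what changed: Replaces the iterative nested loop that threads (points, new_maze) accumulators and appends at the back with structural recursion over rows and cells that builds both results by consing onto the recursive tail result (no accumulator state at all).
import Mathlib
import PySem

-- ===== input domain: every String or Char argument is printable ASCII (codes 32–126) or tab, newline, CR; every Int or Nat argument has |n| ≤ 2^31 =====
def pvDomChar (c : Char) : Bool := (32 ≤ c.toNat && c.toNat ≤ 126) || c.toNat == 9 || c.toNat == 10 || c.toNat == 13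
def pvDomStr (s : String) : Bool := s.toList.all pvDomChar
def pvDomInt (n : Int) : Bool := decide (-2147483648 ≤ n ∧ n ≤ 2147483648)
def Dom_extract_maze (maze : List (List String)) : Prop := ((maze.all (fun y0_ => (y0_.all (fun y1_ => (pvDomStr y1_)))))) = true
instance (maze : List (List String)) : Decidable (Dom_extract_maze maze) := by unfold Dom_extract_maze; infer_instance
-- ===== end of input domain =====

-- B replaces A's iterative accumulator-threading nested loop with structural recursion building both results by consing.

-- ===== PORT A =====
-- single nested loop threading (points, new_maze); inner loop threads (points, row)
def extract_maze (maze : List (List String)) : List (List String) × (List (Int × Int)) :=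
  let st := (PySem.List.enumerate maze).foldl
    (fun (acc : List (Int × Int) × List (List String)) ix =>
      let inner := (PySem.List.enumerate ix.2).foldl
        (fun (acc2 : List (Int × Int) × List String) jy =>
          if jy.2 == "X" then (acc2.1 ++ [(ix.1, jy.1)], acc2.2 ++ ["1"])
          else if jy.2 == "1" then (acc2.1, acc2.2 ++ ["1"])
          else (acc2.1, acc2.2 ++ ["0"]))
        (acc.1, [])
      (inner.1, acc.2 ++ [inner.2]))
    ([], [])
  (st.2, st.1)

-- ===== PORT B =====
-- structural recursion over cells: returns (mapped row, X-points of this row)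
def pvDoCells (i j : Int) : List String → List String × List (Int × Int)
  | [] => ([], [])
  | y :: t =>
    let rp := pvDoCells i (j + 1) t
    if y == "X" then ("1" :: rp.1, (i, j) :: rp.2)
    else ((if y == "1" then "1" else "0") :: rp.1, rp.2)

-- structural recursion over rows
def pvDoRows (i : Int) : List (List String) → List (List String) × List (Int × Int)
  | [] => ([], [])
  | r :: t =>
    let rest := pvDoRows (i + 1) t
    let rp := pvDoCells i 0 r
    (rp.1 :: rest.1, rp.2 ++ rest.2)

def extract_maze_alt (maze : List (List String)) : List (List String) × (List (Int × Int)) :=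
  pvDoRows 0 maze

-- ===== PRECONDITION & SPEC =====
def Spec_extract_maze (maze : List (List String)) (out : List (List String) × (List (Int × Int))) : Prop := out = extract_maze_alt maze
instance (maze : List (List String)) (out : List (List String) × (List (Int × Int))) : Decidable (Spec_extract_maze maze out) := by unfold Spec_extract_maze; infer_instance

-- ===== CLAIM =====
def Claim_equal_extract_maze : Prop := ∀ (maze : List (List String)), Dom_extract_maze maze → Spec_extract_maze maze (extract_maze maze)

-- ===== LEMMAS AND PROOFS =====

-- inner loop starting at (pts, r) appends the recursion's row and points
theorem inner_loop_eq (i j : Int) (cells : List String) (pts : List (Int × Int)) (r : List String) :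
    (PySem.List.enumerate cells j).foldl
      (fun (acc2 : List (Int × Int) × List String) jy =>
        if jy.2 == "X" then (acc2.1 ++ [(i, jy.1)], acc2.2 ++ ["1"])
        else if jy.2 == "1" then (acc2.1, acc2.2 ++ ["1"])
        else (acc2.1, acc2.2 ++ ["0"]))
      (pts, r)
    = (pts ++ (pvDoCells i j cells).2, r ++ (pvDoCells i j cells).1) := by
  induction cells generalizing j pts r with
  | nil => simp [pvDoCells, PySem.List.enumerate_nil]
  | cons y t ih =>
    rw [PySem.List.enumerate_cons, List.foldl_cons]
    by_cases hx : y == "X"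
    · simp only [hx, if_pos, ih]
      simp [pvDoCells, hx]
    · by_cases h1 : y == "1"
      · simp only [hx, h1]
        rw [if_neg (by simp [hx]), if_pos (by simp [h1]), ih]
        simp [pvDoCells, hx, h1]
      · rw [if_neg (by simp [hx]), if_neg (by simp [h1]), ih]
        simp [pvDoCells, hx, h1]

-- outer loop invariant
theorem outer_loop_eq (i : Int) (rows : List (List String)) (pts : List (Int × Int)) (nm : List (List String)) :
    (PySem.List.enumerate rows i).foldl
      (fun (acc : List (Int × Int) × List (List String)) ix =>
        let inner := (PySem.List.enumerate ix.2).foldl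
          (fun (acc2 : List (Int × Int) × List String) jy =>
            if jy.2 == "X" then (acc2.1 ++ [(ix.1, jy.1)], acc2.2 ++ ["1"])
            else if jy.2 == "1" then (acc2.1, acc2.2 ++ ["1"])
            else (acc2.1, acc2.2 ++ ["0"]))
          (acc.1, [])
        (inner.1, acc.2 ++ [inner.2]))
      (pts, nm)
    = (pts ++ (pvDoRows i rows).2, nm ++ (pvDoRows i rows).1) := by
  induction rows generalizing i pts nm with
  | nil => simp [pvDoRows, PySem.List.enumerate_nil]
  | cons r t ih =>
    rw [PySem.List.enumerate_cons, List.foldl_cons]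
    simp only [inner_loop_eq i 0 r pts [], List.nil_append]
    rw [ih]
    simp [pvDoRows, List.append_assoc]

-- ===== VERDICT =====
theorem extract_maze_spec : Claim_equal_extract_maze := by
  intro maze _
  show _ = _
  simp only [extract_maze, extract_maze_alt]
  rw [outer_loop_eq]
  simp
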